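-- pv_equiv track=rewrite | github.com/Khamel83/Atlas | scripts/migrate_config.py | _add_model_tiers
-- ===== SOURCE A (Python) =====
-- def _add_model_tiers(content: str, filename: str) -> str:
--     """Add model tier configuration to content."""
--     lines = content.split("\n")
--     new_lines = []
--     added_tiers = False
--
--     for line in lines:
--         new_lines.append(line)
--
--         # Add tiers after LLM_MODEL line
--         if line.startswith("LLM_MODEL=") and not added_tiers:
--             new_lines.extend(
--                 [
--                     "",
--                     "# Model Tiers for Cost Optimization",
--                     "MODEL_PREMIUM=google/gemini-2.0-flash-lite-001",
--                     "MODEL_BUDGET=mistralai/mistral-7b-instruct:free",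
--                     "MODEL_FALLBACK=google/gemini-2.0-flash-lite-001",
--                 ]
--             )
--             added_tiers = True
--
--     # If no LLM_MODEL found, add at end
--     if not added_tiers:
--         new_lines.extend(
--             [
--                 "",
--                 "# Model Configuration",
--                 "LLM_MODEL=mistralai/mistral-7b-instruct",
--                 "MODEL_PREMIUM=google/gemini-2.0-flash-lite-001",
--                 "MODEL_BUDGET=mistralai/mistral-7b-instruct:free",
--                 "MODEL_FALLBACK=google/gemini-2.0-flash-lite-001",
--             ]
--         )
--
--     return "\n".join(new_lines)
-- ===== SOURCE B (Python) =====
-- def _add_model_tiers(content: str, filename: str) -> str: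
--     """Add model tier configuration by raw substring search/splice (no line list)."""
--     tiers = (
--         "\n\n# Model Tiers for Cost Optimization\n"
--         "MODEL_PREMIUM=google/gemini-2.0-flash-lite-001\n"
--         "MODEL_BUDGET=mistralai/mistral-7b-instruct:free\n"
--         "MODEL_FALLBACK=google/gemini-2.0-flash-lite-001"
--     )
--     if content.startswith("LLM_MODEL="):
--         p = 0
--     else:
--         j = content.find("\nLLM_MODEL=")
--         if j == -1:
--             return content + (
--                 "\n\n# Model Configuration\n"
--                 "LLM_MODEL=mistralai/mistral-7b-instruct\n"
--                 "MODEL_PREMIUM=google/gemini-2.0-flash-lite-001\n"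
--                 "MODEL_BUDGET=mistralai/mistral-7b-instruct:free\n"
--                 "MODEL_FALLBACK=google/gemini-2.0-flash-lite-001"
--             )
--         p = j + 1
--     e = content.find("\n", p)
--     if e == -1:
--         return content + tiers
--     return content[:e] + tiers + content[e:]
-- ===== Notes on version B (the rewrite author's own statement) =====
-- stated objective: alternative
-- what changed: A splits the content into a line list and rebuilds it with a flag-guarded accumulation loop; B never builds a line list: it locates the insertion point by raw substring search (startswith / find("\nLLM_MODEL=") / find("\n", p)) and splices the tier text into the string with index slicing.
import Mathlib
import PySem

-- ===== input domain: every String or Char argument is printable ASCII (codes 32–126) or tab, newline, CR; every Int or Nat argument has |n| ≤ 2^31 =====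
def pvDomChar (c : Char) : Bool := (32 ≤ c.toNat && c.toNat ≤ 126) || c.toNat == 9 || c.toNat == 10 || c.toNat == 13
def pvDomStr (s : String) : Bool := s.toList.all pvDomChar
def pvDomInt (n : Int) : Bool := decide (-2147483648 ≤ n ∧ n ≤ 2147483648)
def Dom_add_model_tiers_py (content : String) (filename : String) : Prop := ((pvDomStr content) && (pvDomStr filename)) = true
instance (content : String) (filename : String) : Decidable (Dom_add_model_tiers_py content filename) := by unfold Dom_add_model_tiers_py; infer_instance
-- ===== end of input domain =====

-- B replaces A's split-into-lines accumulation loop by raw substring search and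
-- index splicing on the unsplit string (objective: alternative — no line list is built).

-- ===== PORT A =====
-- the block A inserts after the first LLM_MODEL= line
def pvTierBlock : List String :=
  [ "",
    "# Model Tiers for Cost Optimization",
    "MODEL_PREMIUM=google/gemini-2.0-flash-lite-001",
    "MODEL_BUDGET=mistralai/mistral-7b-instruct:free",
    "MODEL_FALLBACK=google/gemini-2.0-flash-lite-001" ]

-- the block A appends when no LLM_MODEL= line exists
def pvEndBlock : List String :=
  [ "",
    "# Model Configuration",
    "LLM_MODEL=mistralai/mistral-7b-instruct",
    "MODEL_PREMIUM=google/gemini-2.0-flash-lite-001",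
    "MODEL_BUDGET=mistralai/mistral-7b-instruct:free",
    "MODEL_FALLBACK=google/gemini-2.0-flash-lite-001" ]

-- one iteration of A's for-loop: state = (new_lines, added_tiers)
def pvStepA (st : List String × Bool) (line : String) : List String × Bool :=
  let st' := (st.1 ++ [line], st.2)
  if PySem.Str.startswith line "LLM_MODEL=" && !st'.2 then
    (st'.1 ++ pvTierBlock, true)
  else st'

def add_model_tiers_py (content : String) (filename : String) : String :=
  let lines := (PySem.Str.split? content "\n").getD []
  let st := lines.foldl pvStepA ([], false)
  let st := if !st.2 then (st.1 ++ pvEndBlock, st.2) else st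
  PySem.Str.join "\n" st.1

-- ===== PORT B =====
-- the text B splices in after the LLM_MODEL line
def pvTiersIns : String :=
  "\n\n# Model Tiers for Cost Optimization\nMODEL_PREMIUM=google/gemini-2.0-flash-lite-001\nMODEL_BUDGET=mistralai/mistral-7b-instruct:free\nMODEL_FALLBACK=google/gemini-2.0-flash-lite-001"

-- the text B appends when no LLM_MODEL line exists
def pvEndIns : String :=
  "\n\n# Model Configuration\nLLM_MODEL=mistralai/mistral-7b-instruct\nMODEL_PREMIUM=google/gemini-2.0-flash-lite-001\nMODEL_BUDGET=mistralai/mistral-7b-instruct:free\nMODEL_FALLBACK=google/gemini-2.0-flash-lite-001"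

-- the tail of B after p is set: e = content.find("\n", p); splice at e (or append)
def pvAfter (content : String) (p : Int) : String :=
  let e := PySem.Str.findFrom content "\n" p
  if e = -1 then content ++ pvTiersIns
  else PySem.Str.slice content none (some e) ++ pvTiersIns ++ PySem.Str.slice content (some e) none

def add_model_tiers_py_alt (content : String) (filename : String) : String :=
  if PySem.Str.startswith content "LLM_MODEL=" then pvAfter content 0
  else
    let j := PySem.Str.find content "\nLLM_MODEL="
    if j = -1 then content ++ pvEndIns
    else pvAfter content (j + 1)

-- ===== PRECONDITION & SPEC =====
def Spec_add_model_tiers_py (content : String) (filename : String) (out : String) : Prop := out = add_model_tiers_py_alt content filename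
instance (content : String) (filename : String) (out : String) : Decidable (Spec_add_model_tiers_py content filename out) := by unfold Spec_add_model_tiers_py; infer_instance

-- ===== CLAIM (what is proved, stated in full; the proofs are below) =====
def Claim_equal_add_model_tiers_py : Prop := ∀ (content : String) (filename : String), Dom_add_model_tiers_py content filename → Spec_add_model_tiers_py content filename (add_model_tiers_py content filename)

-- ===== LEMMAS AND PROOFS =====

-- ---- A-side loop characterisation (on the String line list) ----

-- once the flag is set, the loop only appends the remaining lines
lemma foldA_true (ls : List String) (acc : List String) :
    ls.foldl pvStepA (acc, true) = (acc ++ ls, true) := by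
  induction ls generalizing acc with
  | nil => simp
  | cons l t ih => simp [pvStepA, ih]

-- no LLM_MODEL= line: the loop just copies the lines, flag stays false
lemma foldA_none (ls : List String) (acc : List String)
    (hf : ls.findIdx? (fun l => PySem.Str.startswith l "LLM_MODEL=") = none) :
    ls.foldl pvStepA (acc, false) = (acc ++ ls, false) := by
  induction ls generalizing acc with
  | nil => simp
  | cons l t ih =>
    rw [List.findIdx?_cons] at hf
    by_cases h : PySem.Str.startswith l "LLM_MODEL=" = true
    · rw [if_pos (by simpa using h)] at hf
      simp at hf
    · rw [if_neg (by simpa using h)] at hf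
      have h' := h
      simp at h'
      have hs : pvStepA (acc, false) l = (acc ++ [l], false) := by
        simp [pvStepA, h']
      rw [List.foldl_cons, hs, ih _ (Option.map_eq_none_iff.mp hf)]
      simp

-- first LLM_MODEL= line at index i: the tier block is spliced in there, flag true
lemma foldA_some (ls : List String) (acc : List String) (i : Nat)
    (hf : ls.findIdx? (fun l => PySem.Str.startswith l "LLM_MODEL=") = some i) :
    ls.foldl pvStepA (acc, false) =
      (acc ++ ls.take (i + 1) ++ pvTierBlock ++ ls.drop (i + 1), true) := by
  induction ls generalizing acc i with
  | nil => simp at hf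
  | cons l t ih =>
    rw [List.findIdx?_cons] at hf
    by_cases h : PySem.Str.startswith l "LLM_MODEL=" = true
    · rw [if_pos (by simpa using h)] at hf
      obtain rfl : i = 0 := (Option.some_inj.mp hf).symm
      have h' := h
      simp at h'
      have hs : pvStepA (acc, false) l = (acc ++ [l] ++ pvTierBlock, true) := by
        simp [pvStepA, h']
      rw [List.foldl_cons, hs, foldA_true]
      simp
    · rw [if_neg (by simpa using h)] at hf
      obtain ⟨j, hj, hji⟩ := Option.map_eq_some_iff.mp hf
      have h' := h
      simp at h'
      have hs : pvStepA (acc, false) l = (acc ++ [l], false) := by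
        simp [pvStepA, h']
      rw [List.foldl_cons, hs, ih _ _ hj, ← hji]
      simp [List.take_succ_cons, List.drop_succ_cons]

-- ---- proof-side abbreviations (char level) ----

-- the LLM_MODEL= prefix / the "\nLLM_MODEL=" needle, tier texts, as char lists
def pvQ : List Char := "LLM_MODEL=".toList
def pvTI : List Char := pvTiersIns.toList
def pvEI : List Char := pvEndIns.toList
def pvTB : List (List Char) := pvTierBlock.map String.toList
def pvEB : List (List Char) := pvEndBlock.map String.toList

-- simple recursion computing split("\n") on chars
def splitRec : List Char → List (List Char)
  | [] => [[]]
  | c :: t => if c = '\n' then [] :: splitRec t else (splitRec t).modifyHead (c :: ·)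

-- char-level mirror of port B's result (proved equal to the port via the Str bridges)
def pvAfterC (cs : List Char) (p : Int) : List Char :=
  let e := PySem.Chars.findFrom cs ['\n'] p
  if e = -1 then cs ++ pvTI
  else PySem.List.slice cs none (some e) ++ pvTI ++ PySem.List.slice cs (some e) none

def bcore (cs : List Char) : List Char :=
  if PySem.Chars.startswith cs pvQ then pvAfterC cs 0
  else
    let j := PySem.Chars.find cs ('\n' :: pvQ)
    if j = -1 then cs ++ pvEI else pvAfterC cs (j + 1)

-- char-level mirror of port A's result as a function of the line list
def aline (L : List (List Char)) : List Char :=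
  match L.findIdx? (fun l => PySem.Chars.startswith l pvQ) with
  | none => PySem.Chars.join ['\n'] (L ++ pvEB)
  | some i => PySem.Chars.join ['\n'] (L.take (i + 1) ++ pvTB ++ L.drop (i + 1))

-- ---- splitRec facts ----

lemma splitRec_ne_nil : ∀ (cs : List Char), splitRec cs ≠ []
  | [] => by simp [splitRec]
  | c :: t => by
    simp only [splitRec]
    split_ifs
    · simp
    · cases h : splitRec t with
      | nil => exact absurd h (splitRec_ne_nil t)
      | cons a b => simp [h]

lemma splitRec_nlfree (cs : List Char) : ∀ l ∈ splitRec cs, '\n' ∉ l := by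
  induction cs with
  | nil => simp [splitRec]
  | cons c t ih =>
    simp only [splitRec]
    split_ifs with hc
    · intro l hl
      rcases List.mem_cons.mp hl with rfl | hl
      · simp
      · exact ih l hl
    · obtain ⟨a, b, hab⟩ := List.exists_cons_of_ne_nil (splitRec_ne_nil t)
      rw [hab]
      intro l hl
      rcases List.mem_cons.mp hl with rfl | hl
      · intro hm
        rcases List.mem_cons.mp hm with hm | hm
        · exact hc hm.symm
        · exact ih a (hab ▸ List.mem_cons_self) hm
      · exact ih l (hab ▸ List.mem_cons_of_mem _ hl)

-- joining with '\n': cons over a nonempty tail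
lemma join_cons (a : List Char) (M : List (List Char)) (hM : M ≠ []) :
    PySem.Chars.join ['\n'] (a :: M) = a ++ '\n' :: PySem.Chars.join ['\n'] M := by
  obtain ⟨b, M', rfl⟩ := List.exists_cons_of_ne_nil hM
  rw [PySem.Chars.join_cons_cons]
  simp

lemma join_append (M N : List (List Char)) (hM : M ≠ []) (hN : N ≠ []) :
    PySem.Chars.join ['\n'] (M ++ N) =
      PySem.Chars.join ['\n'] M ++ '\n' :: PySem.Chars.join ['\n'] N := by
  induction M with
  | nil => exact absurd rfl hM
  | cons a M' ih =>
    by_cases hM' : M' = []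
    · subst hM'
      rw [List.singleton_append, join_cons a N hN, PySem.Chars.join_singleton]
    · rw [List.cons_append, join_cons a (M' ++ N) (by simp [hM']), ih hM', join_cons a M' hM']
      simp

lemma join_splitRec (cs : List Char) :
    PySem.Chars.join ['\n'] (splitRec cs) = cs := by
  induction cs with
  | nil => simp [splitRec, PySem.Chars.join_singleton]
  | cons c t ih =>
    simp only [splitRec]
    split_ifs with hc
    · rw [join_cons _ _ (splitRec_ne_nil t), ih, hc]
      simp
    · obtain ⟨a, M, hM⟩ := List.exists_cons_of_ne_nil (splitRec_ne_nil t)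
      rw [hM]
      simp only [List.modifyHead_cons]
      cases hM' : M with
      | nil =>
        rw [hM, hM'] at ih
        simp_all [PySem.Chars.join_singleton]
      | cons b M' =>
        rw [PySem.Chars.join_cons_cons]
        rw [hM, hM'] at ih
        rw [PySem.Chars.join_cons_cons] at ih
        simp_all

-- splitOn agrees with splitRec for the "\n" separator
lemma splitOn_go_eq (fuel : Nat) (l cur : List Char) (acc : List (List Char))
    (hf : l.length < fuel) :
    PySem.Chars.splitOn.go ['\n'] fuel l cur acc =
      acc.reverse ++ (splitRec l).modifyHead (cur.reverse ++ ·) := by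
  induction fuel generalizing l cur acc with
  | zero => omega
  | succ fuel ih =>
    cases l with
    | nil =>
      rw [PySem.Chars.splitOn.go]
      · simp [splitRec]
      · omega
    | cons c rest =>
      rw [PySem.Chars.splitOn.go]
      by_cases hc : c = '\n'
      · rw [if_pos (by simp [List.isPrefixOf_cons₂, hc])]
        rw [ih _ _ _ (by simp at hf ⊢; omega)]
        obtain ⟨a, M, hM⟩ := List.exists_cons_of_ne_nil (splitRec_ne_nil rest)
        simp [splitRec, hc, hM]
      · rw [if_neg (by simp [List.isPrefixOf_cons₂]; exact fun h => hc h.symm)]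
        rw [ih _ _ _ (by simp at hf ⊢; omega)]
        obtain ⟨a, M, hM⟩ := List.exists_cons_of_ne_nil (splitRec_ne_nil rest)
        simp [splitRec, hc, hM]

lemma splitOn_eq_splitRec (cs : List Char) :
    PySem.Chars.splitOn cs ['\n'] = splitRec cs := by
  rw [PySem.Chars.splitOn, splitOn_go_eq _ _ _ _ (by omega)]
  obtain ⟨a, M, hM⟩ := List.exists_cons_of_ne_nil (splitRec_ne_nil cs)
  simp [hM]

-- ---- find / findFrom shift lemmas ----

lemma find_go_nil (sub : List Char) (k : Nat) :
    PySem.Chars.find.go sub [] k = if sub.isEmpty then (k : Int) else -1 := by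
  simp [PySem.Chars.find.go]

lemma find_go_cons (sub : List Char) (c : Char) (t : List Char) (k : Nat) :
    PySem.Chars.find.go sub (c :: t) k =
      if sub.isPrefixOf (c :: t) then (k : Int) else PySem.Chars.find.go sub t (k + 1) := by
  rw [PySem.Chars.find.go]

lemma find_go_shift (sub t : List Char) (k : Nat) :
    PySem.Chars.find.go sub t k =
      if PySem.Chars.find t sub = -1 then -1 else (k : Int) + PySem.Chars.find t sub := by
  have hge : ∀ s, (-1 : Int) ≤ PySem.Chars.find s sub := fun s => PySem.Chars.neg_one_le_find s sub
  induction t generalizing k with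
  | nil =>
    rw [show PySem.Chars.find [] sub = PySem.Chars.find.go sub [] 0 from rfl]
    rw [find_go_nil, find_go_nil]
    by_cases h : sub.isEmpty <;> simp [h]
  | cons c t ih =>
    rw [show PySem.Chars.find (c :: t) sub = PySem.Chars.find.go sub (c :: t) 0 from rfl]
    rw [find_go_cons, find_go_cons]
    by_cases h : sub.isPrefixOf (c :: t)
    · simp [h]
    · rw [if_neg h, if_neg h, ih (k + 1), ih 1]
      by_cases hf : PySem.Chars.find t sub = -1
      · simp [hf]
      · have h0 : (0 : Int) ≤ PySem.Chars.find t sub := by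
          have := hge t
          omega
        rw [if_neg hf, if_neg (by omega), if_neg (by omega)]
        push_cast
        omega

-- first occurrence of a '\n'-headed needle in l ++ '\n' :: r, for '\n'-free l
lemma find_append_nl (l r q : List Char) (hnl : '\n' ∉ l) :
    PySem.Chars.find (l ++ '\n' :: r) ('\n' :: q) =
      if q.isPrefixOf r then (l.length : Int)
      else if PySem.Chars.find r ('\n' :: q) = -1 then -1
      else (l.length : Int) + 1 + PySem.Chars.find r ('\n' :: q) := by
  have step : ∀ (l' : List Char) (k : Nat), '\n' ∉ l' →
      PySem.Chars.find.go ('\n' :: q) (l' ++ '\n' :: r) k =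
        PySem.Chars.find.go ('\n' :: q) ('\n' :: r) (k + l'.length) := by
    intro l'
    induction l' with
    | nil => simp
    | cons c t ih =>
      intro k hmem
      rw [List.cons_append, find_go_cons,
        if_neg (by
          simp [List.isPrefixOf_cons₂]
          intro h
          exact absurd h.symm (by simp at hmem; exact fun hh => hmem.1 hh.symm)),
        ih (k + 1) (by simp at hmem; exact hmem.2)]
      congr 1
      simp
      omega
  rw [show PySem.Chars.find (l ++ '\n' :: r) ('\n' :: q) =
      PySem.Chars.find.go ('\n' :: q) (l ++ '\n' :: r) 0 from rfl]
  rw [step l 0 hnl, find_go_cons]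
  by_cases hq : q.isPrefixOf r = true
  · rw [if_pos (by simp [List.isPrefixOf_cons₂, hq]), if_pos hq]
    simp
  · rw [if_neg (by simp [List.isPrefixOf_cons₂, hq]), if_neg hq, find_go_shift]
    by_cases hf : PySem.Chars.find r ('\n' :: q) = -1
    · rw [if_pos hf, if_pos hf]
    · rw [if_neg hf, if_neg hf]
      push_cast
      ring

-- a '\n'-headed needle never occurs in a '\n'-free string
lemma find_nlfree (l q : List Char) (hnl : '\n' ∉ l) :
    PySem.Chars.find l ('\n' :: q) = -1 := by
  rw [PySem.Chars.find_eq_neg_one_iff]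
  intro hinf
  exact hnl (hinf.subset (List.mem_cons_self))

-- prefix through the first line
lemma prefix_append_iff (l r q : List Char) (hnl : '\n' ∉ l) (hq : '\n' ∉ q) :
    q <+: (l ++ '\n' :: r) ↔ q <+: l := by
  constructor
  · intro h
    rcases le_or_gt q.length l.length with hle | hlt
    · have := List.prefix_iff_eq_take.mp h
      rw [List.take_append_of_le_length hle] at this
      exact List.prefix_iff_eq_take.mpr this
    · exfalso
      have hlen : l.length < (l ++ '\n' :: r).length := by simp
      have := h.getElem (i := l.length) hlt
      rw [List.getElem_append_right (le_refl _)] at this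
      simp at this
      exact hq (this ▸ List.getElem_mem _)
  · intro h
    exact h.trans (List.prefix_append l ('\n' :: r))

-- ---- B-side structure lemmas (char level) ----

-- the spliced tier text = "" line ++ tier block, the appended text = "" line ++ end block
set_option maxRecDepth 20000 in
lemma pvTI_eq : pvTI = '\n' :: PySem.Chars.join ['\n'] pvTB := by decide
set_option maxRecDepth 20000 in
lemma pvEI_eq : pvEI = '\n' :: PySem.Chars.join ['\n'] pvEB := by decide
lemma pvTB_ne_nil : pvTB ≠ [] := by decide
lemma pvEB_ne_nil : pvEB ≠ [] := by decide
lemma pvQ_nlfree : '\n' ∉ pvQ := by decide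

-- shifting pvAfterC past a complete first line
lemma afterC_shift (l r : List Char) (hnl : '\n' ∉ l) (p : Nat) (hp : p ≤ r.length) :
    pvAfterC (l ++ '\n' :: r) ((l.length : Int) + 1 + p) = l ++ '\n' :: pvAfterC r p := by
  have hcast : ((l.length : Int) + 1 + p) = ((l.length + 1 + p : Nat) : Int) := by push_cast; ring
  have hk : l.length + 1 + p ≤ (l ++ '\n' :: r).length := by simp; omega
  have hdrop : (l ++ '\n' :: r).drop (l.length + 1 + p) = r.drop p := by
    rw [show l.length + 1 + p = l.length + (1 + p) by ring, List.drop_length_add_append,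
      Nat.add_comm 1 p, List.drop_succ_cons]
  rw [pvAfterC, pvAfterC, hcast, PySem.Chars.findFrom_natCast _ _ _ hk,
    PySem.Chars.findFrom_natCast _ _ _ hp, hdrop]
  by_cases hf : PySem.Chars.find (r.drop p) ['\n'] = -1
  · rw [if_pos hf, if_pos hf, if_pos rfl, if_pos rfl]
    exact List.append_assoc l ('\n' :: r) pvTI
  · have hf0 : 0 ≤ PySem.Chars.find (r.drop p) ['\n'] := by
      have := PySem.Chars.neg_one_le_find (r.drop p) ['\n']
      omega
    set f := PySem.Chars.find (r.drop p) ['\n'] with hfdef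
    rw [if_neg hf, if_neg hf,
      if_neg (show ¬(((l.length + 1 + p : Nat) : Int) + f = -1) by omega),
      if_neg (show ¬(((p : Nat) : Int) + f = -1) by omega)]
    have h1 : ((l.length + 1 + p : Nat) : Int) + f = ((l.length + (1 + (p + f.toNat)) : Nat) : Int) := by
      push_cast
      omega
    have h2 : ((p : Nat) : Int) + f = ((p + f.toNat : Nat) : Int) := by
      push_cast
      omega
    rw [h1, h2, PySem.List.slice_to_natCast, PySem.List.slice_from_natCast,
      PySem.List.slice_to_natCast, PySem.List.slice_from_natCast,
      List.take_length_add_append, List.drop_length_add_append,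
      show 1 + (p + f.toNat) = (p + f.toNat) + 1 by ring]
    simp [List.take_succ_cons, List.drop_succ_cons]

-- B on a single '\n'-free line
lemma bcore_single (l : List Char) (hnl : '\n' ∉ l) :
    bcore l = if PySem.Chars.startswith l pvQ then l ++ pvTI else l ++ pvEI := by
  by_cases h : PySem.Chars.startswith l pvQ = true
  · rw [bcore, if_pos h, if_pos h, pvAfterC]
    simp only [PySem.Chars.findFrom_zero]
    rw [show ('\n' :: ([] : List Char)) = ['\n'] from rfl] at *
    rw [if_pos (by rw [show (['\n'] : List Char) = '\n' :: [] from rfl, find_nlfree l [] hnl])]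
  · rw [bcore, if_neg h, if_neg h]
    simp only []
    rw [if_pos (find_nlfree l pvQ hnl)]

-- B when the first line matches
lemma bcore_head (l r : List Char) (hnl : '\n' ∉ l) (hm : pvQ <+: l) :
    bcore (l ++ '\n' :: r) = l ++ pvTI ++ '\n' :: r := by
  have hsw : PySem.Chars.startswith (l ++ '\n' :: r) pvQ = true := by
    rw [PySem.Chars.startswith, List.isPrefixOf_iff_prefix]
    exact hm.trans (List.prefix_append l ('\n' :: r))
  rw [bcore, if_pos hsw, pvAfterC]
  simp only [PySem.Chars.findFrom_zero]
  rw [show (['\n'] : List Char) = '\n' :: [] from rfl,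
    find_append_nl l r [] hnl,
    if_pos (show ([] : List Char).isPrefixOf r = true by simp)]
  rw [if_neg (show ¬((l.length : Int) = -1) by omega)]
  rw [PySem.List.slice_to_natCast, PySem.List.slice_from_natCast]
  simp

-- B steps over a non-matching first line
lemma bcore_step (l r : List Char) (hnl : '\n' ∉ l) (hm : ¬ pvQ <+: l) :
    bcore (l ++ '\n' :: r) = l ++ '\n' :: bcore r := by
  have hsw : PySem.Chars.startswith (l ++ '\n' :: r) pvQ = false := by
    rw [PySem.Chars.startswith, ← Bool.not_eq_true, List.isPrefixOf_iff_prefix]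
    exact fun h => hm ((prefix_append_iff l r pvQ hnl pvQ_nlfree).mp h)
  rw [bcore, if_neg (by simp [hsw]), bcore]
  by_cases hq : pvQ.isPrefixOf r = true
  · have hswr : PySem.Chars.startswith r pvQ = true := hq
    have hj : PySem.Chars.find (l ++ '\n' :: r) ('\n' :: pvQ) = (l.length : Int) := by
      rw [find_append_nl l r pvQ hnl, if_pos hq]
    rw [hj, if_neg (show ¬((l.length : Int) = -1) by omega), if_pos hswr,
      show (l.length : Int) + 1 = (l.length : Int) + 1 + ((0 : Nat) : Int) by norm_num,
      afterC_shift l r hnl 0 (by omega)]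
    norm_num
  · have hswr : PySem.Chars.startswith r pvQ = false := Bool.eq_false_iff.mpr hq
    by_cases hfr : PySem.Chars.find r ('\n' :: pvQ) = -1
    · have hj : PySem.Chars.find (l ++ '\n' :: r) ('\n' :: pvQ) = -1 := by
        rw [find_append_nl l r pvQ hnl, if_neg hq, if_pos hfr]
      rw [hj, if_pos rfl, if_neg (by simp [hswr]), if_pos hfr]
      exact List.append_assoc l ('\n' :: r) pvEI
    · have hf0 : 0 ≤ PySem.Chars.find r ('\n' :: pvQ) := by
        have := PySem.Chars.neg_one_le_find r ('\n' :: pvQ)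
        omega
      have hlt : (PySem.Chars.find r ('\n' :: pvQ)).toNat < r.length := by
        have hspec := PySem.Chars.find_spec (s := r) (sub := '\n' :: pvQ) hf0
        have hpre := hspec.1
        have hle : ((PySem.Chars.find r ('\n' :: pvQ)).toNat) ≤ r.length := by
          have := PySem.Chars.find_le_length r ('\n' :: pvQ)
          omega
        rcases Nat.lt_or_ge (PySem.Chars.find r ('\n' :: pvQ)).toNat r.length with h | h
        · exact h
        · exfalso
          have hdrop : r.drop (PySem.Chars.find r ('\n' :: pvQ)).toNat = [] := by
            rw [List.drop_eq_nil_iff]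
            omega
          rw [hdrop] at hpre
          simpa using hpre.length_le
      have hj : PySem.Chars.find (l ++ '\n' :: r) ('\n' :: pvQ) =
          (l.length : Int) + 1 + PySem.Chars.find r ('\n' :: pvQ) := by
        rw [find_append_nl l r pvQ hnl, if_neg hq, if_neg hfr]
      rw [hj,
        if_neg (show ¬((l.length : Int) + 1 + PySem.Chars.find r ('\n' :: pvQ) = -1) by omega),
        if_neg (by simp [hswr]), if_neg hfr,
        show (l.length : Int) + 1 + PySem.Chars.find r ('\n' :: pvQ) + 1 =
          (l.length : Int) + 1 + (((PySem.Chars.find r ('\n' :: pvQ)).toNat + 1 : Nat) : Int) by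
            push_cast; omega,
        afterC_shift l r hnl _ (by omega),
        show (((PySem.Chars.find r ('\n' :: pvQ)).toNat + 1 : Nat) : Int) =
          PySem.Chars.find r ('\n' :: pvQ) + 1 by push_cast; omega]

-- ---- A-side structure lemmas on aline ----

lemma aline_single (l : List Char) :
    aline [l] = if PySem.Chars.startswith l pvQ then l ++ pvTI else l ++ pvEI := by
  by_cases h : PySem.Chars.startswith l pvQ = true
  · have hf : ([l] : List (List Char)).findIdx? (fun x => PySem.Chars.startswith x pvQ) = some 0 := by
      simp [List.findIdx?_cons, h]
    simp only [aline, hf, if_pos h]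
    rw [show (([l] : List (List Char)).take 1 ++ pvTB ++ ([l] : List (List Char)).drop 1) = [l] ++ pvTB by simp,
      join_append [l] pvTB (by simp) pvTB_ne_nil, PySem.Chars.join_singleton, pvTI_eq]
  · have hf : ([l] : List (List Char)).findIdx? (fun x => PySem.Chars.startswith x pvQ) = none := by
      simp [List.findIdx?_cons, h]
    simp only [aline, hf, if_neg h]
    rw [join_append [l] pvEB (by simp) pvEB_ne_nil, PySem.Chars.join_singleton, pvEI_eq]

lemma aline_head (l : List Char) (L : List (List Char)) (hL : L ≠ [])
    (hm : PySem.Chars.startswith l pvQ = true) :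
    aline (l :: L) = l ++ pvTI ++ '\n' :: PySem.Chars.join ['\n'] L := by
  have hf : (l :: L).findIdx? (fun x => PySem.Chars.startswith x pvQ) = some 0 := by
    simp [List.findIdx?_cons, hm]
  simp only [aline, hf]
  rw [show ((l :: L).take 1 ++ pvTB ++ (l :: L).drop 1) = [l] ++ (pvTB ++ L) by simp,
    join_append [l] (pvTB ++ L) (by simp) (List.append_ne_nil_of_left_ne_nil pvTB_ne_nil L),
    join_append pvTB L pvTB_ne_nil hL, PySem.Chars.join_singleton, pvTI_eq]
  simp

lemma aline_step (l : List Char) (L : List (List Char)) (hL : L ≠ [])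
    (hm : PySem.Chars.startswith l pvQ = false) :
    aline (l :: L) = l ++ '\n' :: aline L := by
  rw [aline, List.findIdx?_cons, if_neg (by simp [hm])]
  cases hf : L.findIdx? (fun x => PySem.Chars.startswith x pvQ) with
  | none =>
    simp only [Option.map_none]
    conv_rhs => rw [aline, hf]
    rw [show ((l :: L) ++ pvEB) = l :: (L ++ pvEB) by simp,
      join_cons l (L ++ pvEB) (List.append_ne_nil_of_right_ne_nil L pvEB_ne_nil)]
  | some i =>
    simp only [Option.map_some]
    conv_rhs => rw [aline, hf]
    rw [show ((l :: L).take (i + 1 + 1) ++ pvTB ++ (l :: L).drop (i + 1 + 1)) =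
        l :: (L.take (i + 1) ++ pvTB ++ L.drop (i + 1)) by simp,
      join_cons l _ (List.append_ne_nil_of_left_ne_nil
        (List.append_ne_nil_of_right_ne_nil _ pvTB_ne_nil) _)]

-- ---- main char-level equivalence ----

lemma main_lines (L : List (List Char)) (hL : L ≠ []) (hnl : ∀ l ∈ L, '\n' ∉ l) :
    bcore (PySem.Chars.join ['\n'] L) = aline L := by
  induction L with
  | nil => exact absurd rfl hL
  | cons l L' ih =>
    cases hL' : L' with
    | nil =>
      rw [hL'] at *
      rw [PySem.Chars.join_singleton, bcore_single l (hnl l (by simp)), aline_single]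
    | cons b M =>
      rw [← hL']
      have hLne : L' ≠ [] := by simp [hL']
      rw [join_cons l L' hLne]
      by_cases hm : pvQ <+: l
      · rw [bcore_head l _ (hnl l (by simp)) hm,
          aline_head l L' hLne (by rw [PySem.Chars.startswith, List.isPrefixOf_iff_prefix]; exact hm)]
      · rw [bcore_step l _ (hnl l (by simp)) hm,
          aline_step l L' hLne (by rw [PySem.Chars.startswith, ← Bool.not_eq_true, List.isPrefixOf_iff_prefix]; exact hm),
          ih hLne (fun x hx => hnl x (by simp [hx]))]

-- ---- bridging the ports to the char level ----

lemma alt_toList (content filename : String) :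
    (add_model_tiers_py_alt content filename).toList = bcore content.toList := by
  have hP : "\nLLM_MODEL=".toList = '\n' :: pvQ := by decide
  have hN : "\n".toList = ['\n'] := by decide
  have hQ : "LLM_MODEL=".toList = pvQ := rfl
  rw [add_model_tiers_py_alt, bcore]
  simp only [pvAfter, pvAfterC, PySem.Str.startswith_eq, PySem.Str.find_eq,
    PySem.Str.findFrom_eq, hP, hN, hQ, apply_ite (String.toList), String.toList_append,
    PySem.Str.toList_slice, PySem.Chars.slice_eq_listSlice]
  rfl

lemma a_toList (content filename : String) :
    (add_model_tiers_py content filename).toList = aline (splitRec content.toList) := by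
  have hN : "\n".toList = ['\n'] := by decide
  have hQ : "LLM_MODEL=".toList = pvQ := rfl
  have hlines : ((PySem.Str.split? content "\n").getD []).map String.toList =
      splitRec content.toList := by
    have h := PySem.Str.split?_map content "\n"
    rw [hN] at h
    simp only [PySem.Chars.split?, List.isEmpty_cons, Bool.false_eq_true, if_false] at h
    cases hs : PySem.Str.split? content "\n" with
    | none => rw [hs] at h; simp at h
    | some L =>
      rw [hs] at h
      simp only [Option.map_some] at h
      simp [Option.some_inj.mp h, splitOn_eq_splitRec]
  have hfi : ((((PySem.Str.split? content "\n").getD []).map String.toList).findIdx?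
      (fun x => PySem.Chars.startswith x pvQ)) =
        ((PySem.Str.split? content "\n").getD []).findIdx?
          (fun l => PySem.Str.startswith l "LLM_MODEL=") := by
    rw [List.findIdx?_map]
    have hfun : ((fun x => PySem.Chars.startswith x pvQ) ∘ String.toList) =
        (fun l => PySem.Str.startswith l "LLM_MODEL=") := by
      funext x
      simp [PySem.Str.startswith_eq, hQ]
    rw [hfun]
  rw [add_model_tiers_py]
  cases hf : ((PySem.Str.split? content "\n").getD []).findIdx?
      (fun l => PySem.Str.startswith l "LLM_MODEL=") with
  | none =>
    rw [foldA_none _ _ hf]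
    simp only [Bool.not_false]
    rw [if_pos trivial, PySem.Str.toList_join, hN, aline, ← hlines, hfi, hf]
    simp [pvEB]
  | some i =>
    rw [foldA_some _ _ _ hf]
    simp only [Bool.not_true]
    rw [if_neg (by simp), PySem.Str.toList_join, hN, aline, ← hlines, hfi, hf]
    simp [pvTB, List.map_take, List.map_drop]

-- ===== VERDICT (by name: the statement is the Claim_ definition above) =====
theorem add_model_tiers_py_spec : Claim_equal_add_model_tiers_py := by
  intro content filename _
  unfold Spec_add_model_tiers_py
  apply String.toList_inj.mp
  rw [a_toList, alt_toList, ← main_lines (splitRec content.toList) (splitRec_ne_nil _)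
    (splitRec_nlfree _), join_splitRec]
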